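-- pv_equiv track=rewrite | github.com/dvillano2/two_d_database | src/poly_to_rows.py | poly_to_rows
-- ===== SOURCE A (Python) =====
-- def poly_to_rows(p, unbal_dir, coeffs):
-- 	hp = (p + 1) // 2
-- 	denoms = [-unbal_dir, unbal_dir - 1, unbal_dir * (1 - unbal_dir)]
-- 	prod_eval = [pow(denom % p, -1, p) for denom in denoms]
--
-- 	dirs = [0, 1, unbal_dir]
-- 	const_quad_eval = [sum([x * y for x, y in zip(coeffs[:3], [1, d, d*d])]) for d in dirs]
--
-- 	line_sums = [[0 for _ in range(3)] for _ in range(hp)]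
-- 	line_counts = [[0 for _ in range(p)] for _ in range(3)]
--
-- 	point_sums = [[0 for _ in range(p)] for _ in range(hp)]
-- 	point_counts = [[0 for _ in range(p)] for _ in range(p)]
--
-- 	for k in range(3):
-- 		for l in range(p):
-- 			val = (prod_eval[k] * (const_quad_eval[k] + (coeffs[3] * l * l))) % p
--
-- 			line_sums[0][k] += val
-- 			line_counts[k][val] += 1
--
-- 			point_sums[0][l] += val
-- 			point_counts[l][val] += 1
--
-- 	for i in range(1, hp):
-- 		for j in range(3):
-- 			line_sums[i][j] = line_sums[i - 1][j] + p - p * line_counts[j][p - i]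
--
-- 	for i in range(1, hp):
-- 		for j in range(p):
-- 			point_sums[i][j] = point_sums[i - 1][j] + 3 - p * point_counts[j][p - i]
--
-- 	return [tuple([x] + coeffs + [unbal_dir] + y + z) for x, y, z in zip(range(1, hp), line_sums[1:], point_sums[1:])]
-- ===== SOURCE B (Python) =====
-- def poly_to_rows(p, unbal_dir, coeffs):
--     hp = (p + 1) // 2
--     denoms = [-unbal_dir, unbal_dir - 1, unbal_dir * (1 - unbal_dir)]
--     prod_eval = [pow(denom % p, -1, p) for denom in denoms]
--
--     dirs = [0, 1, unbal_dir]
--     const_quad_eval = [sum([x * y for x, y in zip(coeffs[:3], [1, d, d*d])]) for d in dirs]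
--
--     base = [[(prod_eval[k] * (const_quad_eval[k] + coeffs[3] * l * l)) % p
--              for l in range(p)] for k in range(3)]
--
--     return [tuple([x] + coeffs + [unbal_dir]
--                   + [sum((base[k][l] + x) % p for l in range(p)) for k in range(3)]
--                   + [sum((base[k][j] + x) % p for k in range(3)) for j in range(p)])
--             for x in range(1, hp)]
-- ===== Notes on version B (the rewrite author's own statement) =====
-- stated objective: simpler
-- what changed: B drops A's four sum/count tables, the in-place accumulation pass and the two prefix recurrences line_sums[i]=line_sums[i-1]+p-p*count and point_sums[i]=point_sums[i-1]+3-p*count, and instead computes one base matrix base[k][l]=(prod_eval[k]*(const_quad_eval[k]+coeffs[3]*l*l))%p and builds every output row directly as sums of (base[k][l]+x)%p.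
import Mathlib
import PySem

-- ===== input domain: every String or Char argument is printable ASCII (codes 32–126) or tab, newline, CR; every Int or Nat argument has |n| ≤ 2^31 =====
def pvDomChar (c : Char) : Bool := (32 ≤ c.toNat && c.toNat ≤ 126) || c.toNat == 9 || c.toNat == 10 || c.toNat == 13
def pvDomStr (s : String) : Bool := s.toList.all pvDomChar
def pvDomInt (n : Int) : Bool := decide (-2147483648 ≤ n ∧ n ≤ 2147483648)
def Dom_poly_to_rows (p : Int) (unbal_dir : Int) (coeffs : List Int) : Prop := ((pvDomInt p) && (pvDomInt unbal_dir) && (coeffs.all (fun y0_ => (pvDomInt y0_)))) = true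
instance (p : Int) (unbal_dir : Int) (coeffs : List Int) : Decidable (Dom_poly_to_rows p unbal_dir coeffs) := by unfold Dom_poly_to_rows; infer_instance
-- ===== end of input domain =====

-- B replaces A's four count/sum tables and the prefix recurrences by direct per-row modular sums
-- (objective: simpler); same return value on all inputs where A returns.

-- ===== PORT A =====

-- Hand port of Python's pow(a, -1, m) (three-argument pow with exponent -1), via extended
-- Euclid (Mathlib's Int.gcdA) exactly as CPython computes it: a Bezout coefficient x with
-- a*x ≡ gcd(a, m) (mod m), reduced into m's residue range by Python's %. Python raises
-- ValueError exactly when gcd(a, m) ≠ 1 — those inputs are excluded by Pre_poly_to_rows;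
-- exact everywhere else (m ≠ 0 also guaranteed by Pre_).
def pymodinv (a m : Int) : Int :=
  if Int.gcd a m = 1 then PySem.Int.mod (Int.gcdA a m) m else 0

-- t[i][j] read / write for the 2D lists both Pythons use; exact for the indices these ports
-- perform: every index is provably nonnegative and in range when the loops run (p ≥ 1 and
-- len(coeffs) ≥ 4 under Pre_poly_to_rows), so Python's negative-index wrap / IndexError never fire.
def pvGet2 (t : List (List Int)) (i j : Int) : Int :=
  PySem.List.pyGetD (PySem.List.pyGetD t i []) j 0

def pvSet2 (t : List (List Int)) (i j : Int) (v : Int) : List (List Int) :=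
  PySem.List.pySetD t i (PySem.List.pySetD (PySem.List.pyGetD t i []) j v)

def pvUpd2 (t : List (List Int)) (i j : Int) (f : Int → Int) : List (List Int) :=
  pvSet2 t i j (f (pvGet2 t i j))

def poly_to_rows (p : Int) (unbal_dir : Int) (coeffs : List Int) : List (List Int) :=
  let hp := PySem.Int.floordiv (p + 1) 2
  let denoms : List Int := [-unbal_dir, unbal_dir - 1, unbal_dir * (1 - unbal_dir)]
  let prod_eval := denoms.map (fun denom => pymodinv (PySem.Int.mod denom p) p)
  let dirs : List Int := [0, 1, unbal_dir]
  let const_quad_eval := dirs.map (fun d =>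
    (((PySem.List.slice coeffs none (some 3)).zip [1, d, d * d]).map (fun xy => xy.1 * xy.2)).sum)
  let st0 := ((PySem.List.pyRange 0 hp 1).map (fun _ => (PySem.List.pyRange 0 3 1).map (fun _ => (0 : Int))),
              (PySem.List.pyRange 0 3 1).map (fun _ => (PySem.List.pyRange 0 p 1).map (fun _ => (0 : Int))),
              (PySem.List.pyRange 0 hp 1).map (fun _ => (PySem.List.pyRange 0 p 1).map (fun _ => (0 : Int))),
              (PySem.List.pyRange 0 p 1).map (fun _ => (PySem.List.pyRange 0 p 1).map (fun _ => (0 : Int))))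
  let st := (PySem.List.pyRange 0 3 1).foldl (fun st k =>
      (PySem.List.pyRange 0 p 1).foldl (fun st l =>
        let v := PySem.Int.mod (PySem.List.pyGetD prod_eval k 0 *
          (PySem.List.pyGetD const_quad_eval k 0 + PySem.List.pyGetD coeffs 3 0 * l * l)) p
        (pvUpd2 st.1 0 k (· + v), pvUpd2 st.2.1 k v (· + 1),
         pvUpd2 st.2.2.1 0 l (· + v), pvUpd2 st.2.2.2 l v (· + 1))) st) st0
  let line_sums := (PySem.List.pyRange 1 hp 1).foldl (fun t i =>
      (PySem.List.pyRange 0 3 1).foldl (fun t j =>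
        pvSet2 t i j (pvGet2 t (i - 1) j + p - p * pvGet2 st.2.1 j (p - i))) t) st.1
  let point_sums := (PySem.List.pyRange 1 hp 1).foldl (fun t i =>
      (PySem.List.pyRange 0 p 1).foldl (fun t j =>
        pvSet2 t i j (pvGet2 t (i - 1) j + 3 - p * pvGet2 st.2.2.2 j (p - i))) t) st.2.2.1
  ((PySem.List.pyRange 1 hp 1).zip
     ((PySem.List.slice line_sums (some 1) none).zip (PySem.List.slice point_sums (some 1) none))).map
    (fun t => [t.1] ++ coeffs ++ [unbal_dir] ++ t.2.1 ++ t.2.2)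

-- ===== PORT B =====
def poly_to_rows_alt (p : Int) (unbal_dir : Int) (coeffs : List Int) : List (List Int) :=
  let hp := PySem.Int.floordiv (p + 1) 2
  let denoms : List Int := [-unbal_dir, unbal_dir - 1, unbal_dir * (1 - unbal_dir)]
  let prod_eval := denoms.map (fun denom => pymodinv (PySem.Int.mod denom p) p)
  let dirs : List Int := [0, 1, unbal_dir]
  let const_quad_eval := dirs.map (fun d =>
    (((PySem.List.slice coeffs none (some 3)).zip [1, d, d * d]).map (fun xy => xy.1 * xy.2)).sum)
  let base := (PySem.List.pyRange 0 3 1).map (fun k => (PySem.List.pyRange 0 p 1).map (fun l =>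
      PySem.Int.mod (PySem.List.pyGetD prod_eval k 0 *
        (PySem.List.pyGetD const_quad_eval k 0 + PySem.List.pyGetD coeffs 3 0 * l * l)) p))
  (PySem.List.pyRange 1 hp 1).map (fun x =>
    [x] ++ coeffs ++ [unbal_dir]
      ++ (PySem.List.pyRange 0 3 1).map (fun k =>
           ((PySem.List.pyRange 0 p 1).map (fun l => PySem.Int.mod (pvGet2 base k l + x) p)).sum)
      ++ (PySem.List.pyRange 0 p 1).map (fun j =>
           ((PySem.List.pyRange 0 3 1).map (fun k => PySem.Int.mod (pvGet2 base k j + x) p)).sum))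

-- ===== PRECONDITION & SPEC =====
-- Exactly where the Python A returns normally: pow(·, -1, p) needs p ≠ 0 (else ZeroDivisionError)
-- and all three denominators invertible mod p (else ValueError), which is gcd(unbal_dir, p) = 1
-- and gcd(unbal_dir - 1, p) = 1; coeffs[3] is only reached when the l-loop runs, i.e. when p ≥ 1
-- (else IndexError for shorter coeffs).
def Pre_poly_to_rows (p : Int) (unbal_dir : Int) (coeffs : List Int) : Prop :=
  p ≠ 0 ∧ Int.gcd unbal_dir p = 1 ∧ Int.gcd (unbal_dir - 1) p = 1 ∧ (1 ≤ p → 4 ≤ coeffs.length)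
instance (p : Int) (unbal_dir : Int) (coeffs : List Int) : Decidable (Pre_poly_to_rows p unbal_dir coeffs) := by unfold Pre_poly_to_rows; infer_instance

def pvWitness_poly_to_rows : Int × Int × List Int := (7, 3, [1, 2, 3, 4])

def Spec_poly_to_rows (p : Int) (unbal_dir : Int) (coeffs : List Int) (out : List (List Int)) : Prop := out = poly_to_rows_alt p unbal_dir coeffs
instance (p : Int) (unbal_dir : Int) (coeffs : List Int) (out : List (List Int)) : Decidable (Spec_poly_to_rows p unbal_dir coeffs out) := by unfold Spec_poly_to_rows; infer_instance

-- ===== CLAIM (what is proved, stated in full; the proofs are below) =====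
def Claim_equal_poly_to_rows : Prop := ∀ (p : Int) (unbal_dir : Int) (coeffs : List Int), Dom_poly_to_rows p unbal_dir coeffs → Pre_poly_to_rows p unbal_dir coeffs → Spec_poly_to_rows p unbal_dir coeffs (poly_to_rows p unbal_dir coeffs)

-- ===== LEMMAS AND PROOFS =====

-- table of r rows and c columns whose (i, j) entry is g i j
def pvTab (r c : Int) (g : Int → Int → Int) : List (List Int) :=
  (PySem.List.pyRange 0 r 1).map (fun i => (PySem.List.pyRange 0 c 1).map (fun j => g i j))

lemma pvTab_get (r c : Int) (g : Int → Int → Int) (i j : Int)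
    (h0 : 0 ≤ i) (hi : i < r) (h0' : 0 ≤ j) (hj : j < c) :
    pvGet2 (pvTab r c g) i j = g i j := by
  unfold pvGet2 pvTab
  rw [PySem.List.pyGetD_map_pyRange_of_nonneg _ r i _ h0 hi,
      PySem.List.pyGetD_map_pyRange_of_nonneg _ c j _ h0' hj]

lemma set_map_range {α : Type} (n : Nat) (f : Nat → α) (k : Nat) (v : α) :
    ((List.range n).map f).set k v = (List.range n).map (fun t => if t = k then v else f t) := by
  apply List.ext_getElem (by simp)
  intro i h1 h2
  simp only [List.getElem_set, List.getElem_map, List.getElem_range] at *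
  split_ifs with h h' h'
  · rfl
  · omega
  · omega
  · rfl

lemma pvSetD_map_pyRange {α : Type} (n : Int) (f : Int → α) (j : Int) (v : α)
    (h0 : 0 ≤ j) (hj : j < n) :
    PySem.List.pySetD ((PySem.List.pyRange 0 n 1).map f) j v
      = (PySem.List.pyRange 0 n 1).map (fun t => if t = j then v else f t) := by
  have hn : n = ((n.toNat : Nat) : Int) := by omega
  have hjn : j = ((j.toNat : Nat) : Int) := by omega
  rw [hn, PySem.List.pyRange_zero_natCast, List.map_map, List.map_map]
  have hlen : j.toNat < ((List.range n.toNat).map (fun k => f ((k : Nat) : Int))).length := by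
    simp; omega
  rw [show (PySem.List.pySetD ((List.range n.toNat).map (f ∘ fun k => ((k : Nat) : Int))) j v) =
      ((List.range n.toNat).map (f ∘ fun k => ((k : Nat) : Int))).set j.toNat v from ?_]
  · rw [set_map_range _ _ _]
    apply List.map_congr_left
    intro t ht
    simp only [Function.comp]
    split_ifs with h h' h'
    · rfl
    · exact absurd (by omega : (t:Int) = j) h'
    · exact absurd (by omega : t = j.toNat) h
    · rfl
  · rw [hjn]
    unfold PySem.List.pySetD
    rw [PySem.List.pySet?_natCast _ _ _ (by simp; omega)]
    rfl

lemma pvTab_set (r c : Int) (g : Int → Int → Int) (i j v : Int)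
    (h0 : 0 ≤ i) (hi : i < r) (h0' : 0 ≤ j) (hj : j < c) :
    pvSet2 (pvTab r c g) i j v
      = pvTab r c (fun a b => if a = i ∧ b = j then v else g a b) := by
  unfold pvSet2 pvTab
  rw [PySem.List.pyGetD_map_pyRange_of_nonneg _ r i _ h0 hi,
      pvSetD_map_pyRange c _ j v h0' hj,
      pvSetD_map_pyRange r _ i _ h0 hi]
  apply List.map_congr_left
  intro a ha
  by_cases hai : a = i
  · subst hai
    rw [if_pos rfl]
    apply List.map_congr_left
    intro b hb
    by_cases hbj : b = j
    · simp [hbj]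
    · simp [hbj]
  · simp only [if_neg hai]
    apply List.map_congr_left
    intro b hb
    simp [hai]

lemma pvTab_congr (r c : Int) (g g' : Int → Int → Int)
    (h : ∀ i j, 0 ≤ i → i < r → 0 ≤ j → j < c → g i j = g' i j) :
    pvTab r c g = pvTab r c g' := by
  unfold pvTab
  refine List.map_congr_left (fun i hi => ?_)
  refine List.map_congr_left (fun j hj => ?_)
  rw [PySem.List.mem_pyRange_one] at hi hj
  exact h i j hi.1 hi.2 hj.1 hj.2

lemma pvMod_bounds (x p : Int) (hp : 0 < p) : 0 ≤ PySem.Int.mod x p ∧ PySem.Int.mod x p < p := by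
  rw [PySem.Int.mod_eq_emod_of_pos hp]
  exact ⟨Int.emod_nonneg x (by omega), Int.emod_lt_of_pos x hp⟩

lemma pvMod_small (x p : Int) (h0 : 0 ≤ x) (h : x < p) : PySem.Int.mod x p = x := by
  rw [PySem.Int.mod_eq_emod_of_pos (by omega)]
  exact Int.emod_eq_of_lt h0 h

lemma pvMod_shift_pt (v m p : Int) (hv0 : 0 ≤ v) (hvp : v < p) (hm : 1 ≤ m) (hmp : m < p) :
    PySem.Int.mod (v + m) p
      = PySem.Int.mod (v + (m - 1)) p + 1 - p * (if v = p - m then 1 else 0) := by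
  have hp0 : 0 < p := by omega
  rcases lt_trichotomy (v + m) p with h | h | h
  · rw [pvMod_small _ _ (by omega) h, pvMod_small _ _ (by omega) (by omega)]
    rw [if_neg (by omega)]; ring
  · have e2 : PySem.Int.mod (v + (m - 1)) p = p - 1 := by
      rw [show v + (m - 1) = p - 1 by omega]
      exact pvMod_small _ _ (by omega) (by omega)
    have e0 : PySem.Int.mod (v + m) p = 0 := by
      rw [h, PySem.Int.mod_eq_emod_of_pos hp0, Int.emod_self]
    rw [e0, e2, if_pos (by omega)]; ring
  · have e1 : PySem.Int.mod (v + m) p = v + m - p := by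
      rw [PySem.Int.mod_eq_emod_of_pos hp0, ← Int.sub_emod_right (v + m) p,
          Int.emod_eq_of_lt (by omega) (by omega)]
    have e2 : PySem.Int.mod (v + (m - 1)) p = v + (m - 1) - p := by
      rw [PySem.Int.mod_eq_emod_of_pos hp0, ← Int.sub_emod_right (v + (m - 1)) p,
          Int.emod_eq_of_lt (by omega) (by omega)]
    rw [e1, e2, if_neg (by omega)]; ring

lemma pvShift_sum (p m : Int) (E : List Int) (W : Int → Int)
    (hW : ∀ e ∈ E, 0 ≤ W e ∧ W e < p) (hm : 1 ≤ m) (hmp : m < p) :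
    (E.map (fun e => PySem.Int.mod (W e + m) p)).sum
      = (E.map (fun e => PySem.Int.mod (W e + (m - 1)) p)).sum
        + (E.length : Int) - p * ((E.countP (fun e => W e == p - m) : Nat) : Int) := by
  induction E with
  | nil => simp
  | cons x E ih =>
    have hx := hW x (by simp)
    have ihh := ih (fun e he => hW e (by simp [he]))
    simp only [List.map_cons, List.sum_cons, List.countP_cons, List.length_cons]
    rw [ihh, pvMod_shift_pt (W x) m p hx.1 hx.2 hm hmp]
    by_cases hc : W x = p - m
    · rw [if_pos hc, if_pos (by simp [hc])]
      push_cast; ring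
    · rw [if_neg hc, if_neg (by simp [hc])]
      push_cast; ring

lemma pvSum_filter_eq (L : List Int) (hnd : L.Nodup) (l : Int) (hl : l ∈ L) (f : Int → Int) :
    ((L.filter (fun x => x == l)).map f).sum = f l := by
  induction L with
  | nil => simp at hl
  | cons x L ih =>
    simp only [List.filter_cons]
    rcases List.mem_cons.mp hl with h | h
    · subst h
      rw [if_pos (by simp)]
      have hnil : L.filter (fun y => y == l) = [] := by
        apply List.filter_eq_nil_iff.mpr
        intro a ha
        simp only [beq_iff_eq]
        intro hal
        exact (List.nodup_cons.mp hnd).1 (hal ▸ ha)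
      simp [hnil]
    · have hxl : ¬ ((x == l) = true) := by
        simp only [beq_iff_eq]
        intro e
        exact (List.nodup_cons.mp hnd).1 (by rw [e]; exact h)
      rw [if_neg hxl]
      exact ih (List.nodup_cons.mp hnd).2 h

lemma pvCountP_and_eq_ite (L : List Int) (hnd : L.Nodup) (l : Int) (hl : l ∈ L) (P : Int → Bool) :
    L.countP (fun x => x == l && P x) = if P l then 1 else 0 := by
  induction L with
  | nil => simp at hl
  | cons x L ih =>
    simp only [List.countP_cons]
    rcases List.mem_cons.mp hl with h | h
    · subst h
      have h0 : L.countP (fun y => y == l && P y) = 0 := by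
        apply List.countP_eq_zero.mpr
        intro a ha
        simp only [Bool.and_eq_true, beq_iff_eq, not_and]
        intro hal _
        exact (List.nodup_cons.mp hnd).1 (hal ▸ ha)
      rw [h0]
      by_cases hP : P l
      · simp [hP]
      · simp [hP]
    · have hxl : ¬ (x = l) := by
        intro e
        exact (List.nodup_cons.mp hnd).1 (by rw [e]; exact h)
      rw [ih (List.nodup_cons.mp hnd).2 h]
      simp [hxl]

lemma pvPhase1_inner (p hp : Int) (Vf : Int → Int → Int) (k : Int) (L : List Int)
    (hk0 : 0 ≤ k) (hk : k < 3) (hhp : 0 < hp) (_hp0 : 0 < p)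
    (hV : ∀ a l, 0 ≤ Vf a l ∧ Vf a l < p)
    (hL : ∀ l ∈ L, 0 ≤ l ∧ l < p)
    (g1 g2 g3 g4 : Int → Int → Int) :
    L.foldl (fun st l =>
        (pvUpd2 st.1 0 k (· + Vf k l), pvUpd2 st.2.1 k (Vf k l) (· + 1),
         pvUpd2 st.2.2.1 0 l (· + Vf k l), pvUpd2 st.2.2.2 l (Vf k l) (· + 1)))
      (pvTab hp 3 g1, pvTab 3 p g2, pvTab hp p g3, pvTab p p g4)
    = (pvTab hp 3 (fun i j => if i = 0 ∧ j = k then g1 i j + (L.map (Vf k)).sum else g1 i j),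
       pvTab 3 p (fun a v => if a = k then g2 a v + ((L.countP (fun l => Vf k l == v) : Nat) : Int) else g2 a v),
       pvTab hp p (fun i l => if i = 0 then g3 i l + ((L.filter (fun x => x == l)).map (Vf k)).sum else g3 i l),
       pvTab p p (fun l v => g4 l v + ((L.countP (fun x => x == l && (Vf k x == v)) : Nat) : Int))) := by
  induction L generalizing g1 g2 g3 g4 with
  | nil =>
    simp only [List.foldl_nil, List.map_nil, List.sum_nil, List.countP_nil, List.filter_nil,
      Nat.cast_zero, add_zero, Prod.mk.injEq]
    refine ⟨?_, ?_, ?_, ?_⟩ <;>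
      first
      | trivial
      | · apply pvTab_congr
          intro i j _ _ _ _
          split_ifs <;> rfl
  | cons x L ih =>
    have hx := hL x (by simp)
    have hVx := hV k x
    simp only [List.foldl_cons]
    have e1 : pvUpd2 (pvTab hp 3 g1) 0 k (· + Vf k x)
        = pvTab hp 3 (fun i j => if i = 0 ∧ j = k then g1 i j + Vf k x else g1 i j) := by
      unfold pvUpd2
      rw [pvTab_get _ _ _ _ _ le_rfl hhp hk0 hk, pvTab_set _ _ _ _ _ _ le_rfl hhp hk0 hk]
      apply pvTab_congr
      intro i j _ _ _ _
      by_cases h : i = 0 ∧ j = k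
      · obtain ⟨rfl, rfl⟩ := h; simp
      · simp [h]
    have e2 : pvUpd2 (pvTab 3 p g2) k (Vf k x) (· + 1)
        = pvTab 3 p (fun a v => if a = k ∧ v = Vf k x then g2 a v + 1 else g2 a v) := by
      unfold pvUpd2
      rw [pvTab_get _ _ _ _ _ hk0 hk hVx.1 hVx.2, pvTab_set _ _ _ _ _ _ hk0 hk hVx.1 hVx.2]
      apply pvTab_congr
      intro a v _ _ _ _
      by_cases h : a = k ∧ v = Vf k x
      · obtain ⟨rfl, rfl⟩ := h; simp
      · simp [h]
    have e3 : pvUpd2 (pvTab hp p g3) 0 x (· + Vf k x)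
        = pvTab hp p (fun i l => if i = 0 ∧ l = x then g3 i l + Vf k x else g3 i l) := by
      unfold pvUpd2
      rw [pvTab_get _ _ _ _ _ le_rfl hhp hx.1 hx.2, pvTab_set _ _ _ _ _ _ le_rfl hhp hx.1 hx.2]
      apply pvTab_congr
      intro i l _ _ _ _
      by_cases h : i = 0 ∧ l = x
      · obtain ⟨rfl, rfl⟩ := h; simp
      · simp [h]
    have e4 : pvUpd2 (pvTab p p g4) x (Vf k x) (· + 1)
        = pvTab p p (fun l v => if l = x ∧ v = Vf k x then g4 l v + 1 else g4 l v) := by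
      unfold pvUpd2
      rw [pvTab_get _ _ _ _ _ hx.1 hx.2 hVx.1 hVx.2, pvTab_set _ _ _ _ _ _ hx.1 hx.2 hVx.1 hVx.2]
      apply pvTab_congr
      intro l v _ _ _ _
      by_cases h : l = x ∧ v = Vf k x
      · obtain ⟨rfl, rfl⟩ := h; simp
      · simp [h]
    rw [e1, e2, e3, e4, ih (fun l hl => hL l (List.mem_cons_of_mem x hl))]
    simp only [Prod.mk.injEq]
    refine ⟨?_, ?_, ?_, ?_⟩
    · apply pvTab_congr
      intro i j _ _ _ _
      by_cases h : i = 0 ∧ j = k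
      · simp only [if_pos h, List.map_cons, List.sum_cons]; ring
      · simp only [if_neg h]
    · apply pvTab_congr
      intro a v _ _ _ _
      by_cases h : a = k
      · subst h
        by_cases hv : v = Vf a x
        · rw [if_pos rfl, if_pos ⟨rfl, hv⟩, if_pos rfl, List.countP_cons,
              if_pos (by simp [hv])]
          push_cast; ring
        · rw [if_pos rfl, if_neg (by simp [hv]), if_pos rfl, List.countP_cons,
              if_neg (by simp; intro h'; exact absurd h'.symm hv)]
          push_cast; ring
      · rw [if_neg h, if_neg (by simp [h]), if_neg h]
    · apply pvTab_congr
      intro i l _ _ _ _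
      by_cases h : i = 0
      · subst h
        by_cases hlx : x = l
        · subst hlx
          rw [if_pos rfl, if_pos ⟨rfl, rfl⟩, if_pos rfl, List.filter_cons,
              if_pos (by simp)]
          simp only [List.map_cons, List.sum_cons]; ring
        · rw [if_pos rfl, if_neg (by simp; intro h'; exact absurd h'.symm hlx), if_pos rfl,
              List.filter_cons, if_neg (by simp [hlx])]
      · rw [if_neg h, if_neg (by simp [h]), if_neg h]
    · apply pvTab_congr
      intro l v _ _ _ _
      rw [List.countP_cons]
      by_cases h : l = x ∧ v = Vf k x
      · obtain ⟨rfl, rfl⟩ := h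
        rw [if_pos ⟨rfl, rfl⟩, if_pos (by simp)]
        push_cast; ring
      · rw [if_neg h, if_neg (by simp; intro h1 h2; exact h ⟨h1.symm, h2.symm⟩)]
        push_cast; ring

lemma pvPhase1 (p hp : Int) (Vf : Int → Int → Int)
    (hhp : 0 < hp) (hp0 : 0 < p)
    (hV : ∀ a l, 0 ≤ Vf a l ∧ Vf a l < p) :
    (PySem.List.pyRange 0 3 1).foldl (fun st k =>
        (PySem.List.pyRange 0 p 1).foldl (fun st l =>
          (pvUpd2 st.1 0 k (· + Vf k l), pvUpd2 st.2.1 k (Vf k l) (· + 1),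
           pvUpd2 st.2.2.1 0 l (· + Vf k l), pvUpd2 st.2.2.2 l (Vf k l) (· + 1))) st)
      (pvTab hp 3 (fun _ _ => 0), pvTab 3 p (fun _ _ => 0),
       pvTab hp p (fun _ _ => 0), pvTab p p (fun _ _ => 0))
    = (pvTab hp 3 (fun i j => if i = 0 then ((PySem.List.pyRange 0 p 1).map (Vf j)).sum else 0),
       pvTab 3 p (fun a v => (((PySem.List.pyRange 0 p 1).countP (fun l => Vf a l == v) : Nat) : Int)),
       pvTab hp p (fun i l => if i = 0 then ((PySem.List.pyRange 0 3 1).map (fun a => Vf a l)).sum else 0),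
       pvTab p p (fun l v => (((PySem.List.pyRange 0 3 1).countP (fun a => Vf a l == v) : Nat) : Int))) := by
  have hL : ∀ l ∈ PySem.List.pyRange 0 p 1, 0 ≤ l ∧ l < p := by
    intro l hl
    rw [PySem.List.mem_pyRange_one] at hl
    exact ⟨hl.1, hl.2⟩
  have hnd : (PySem.List.pyRange 0 p 1).Nodup := PySem.List.nodup_pyRange_one 0 p
  rw [show PySem.List.pyRange 0 3 1 = [0, 1, 2] from by decide]
  simp only [List.foldl_cons, List.foldl_nil]
  rw [pvPhase1_inner p hp Vf 0 _ (by omega) (by omega) hhp hp0 hV hL,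
      pvPhase1_inner p hp Vf 1 _ (by omega) (by omega) hhp hp0 hV hL,
      pvPhase1_inner p hp Vf 2 _ (by omega) (by omega) hhp hp0 hV hL]
  simp only [Prod.mk.injEq]
  refine ⟨?_, ?_, ?_, ?_⟩
  · apply pvTab_congr
    intro i j _ _ hj0 hj3
    by_cases hi : i = 0
    · interval_cases j <;> simp [hi]
    · simp [hi]
  · apply pvTab_congr
    intro a v _ ha3 _ _
    rename_i ha0 _
    interval_cases a <;> simp
  · apply pvTab_congr
    intro i l _ _ hl0 hlp
    have hmem : l ∈ PySem.List.pyRange 0 p 1 := by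
      rw [PySem.List.mem_pyRange_one]; exact ⟨hl0, hlp⟩
    by_cases hi : i = 0
    · rw [if_pos hi, if_pos hi, if_pos hi,
          pvSum_filter_eq _ hnd l hmem (Vf 0), pvSum_filter_eq _ hnd l hmem (Vf 1),
          pvSum_filter_eq _ hnd l hmem (Vf 2)]
      simp [hi, add_assoc]
    · simp [hi]
  · apply pvTab_congr
    intro l v hl0 hlp _ _
    have hmem : l ∈ PySem.List.pyRange 0 p 1 := by
      rw [PySem.List.mem_pyRange_one]; exact ⟨hl0, hlp⟩
    rw [pvCountP_and_eq_ite _ hnd l hmem (fun x => Vf 0 x == v),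
        pvCountP_and_eq_ite _ hnd l hmem (fun x => Vf 1 x == v),
        pvCountP_and_eq_ite _ hnd l hmem (fun x => Vf 2 x == v)]
    simp only [List.countP_cons, List.countP_nil]
    split_ifs <;> push_cast

lemma pvHp_bounds (p : Int) (hp0 : 0 < p) :
    1 ≤ PySem.Int.floordiv (p + 1) 2 ∧ 2 * PySem.Int.floordiv (p + 1) 2 ≤ p + 1 := by
  constructor
  · rw [PySem.Int.le_floordiv_iff_mul_le (by omega)]; omega
  · have h := (PySem.Int.le_floordiv_iff_mul_le (a := p + 1) (b := 2)
      (q := PySem.Int.floordiv (p + 1) 2) (by omega)).mp le_rfl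
    omega

lemma pvRow_fold (hp c p elen m : Int) (ct : Int → Int → Int) (h : Int → Int → Int)
    (J : List Int) (hJ : ∀ j ∈ J, 0 ≤ j ∧ j < c)
    (hm1 : 1 ≤ m) (hm : m < hp) (hpm0 : 0 ≤ p - m) (hpm : p - m < p) :
    J.foldl (fun t j =>
        pvSet2 t m j (pvGet2 t (m - 1) j + elen - p * pvGet2 (pvTab c p ct) j (p - m))) (pvTab hp c h)
    = pvTab hp c (fun i a => if i = m ∧ a ∈ J then h (m - 1) a + elen - p * ct a (p - m) else h i a) := by
  induction J generalizing h with
  | nil =>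
    simp only [List.foldl_nil]
    apply pvTab_congr
    intro i a _ _ _ _
    simp
  | cons j0 J ih =>
    have hj0 := hJ j0 (by simp)
    simp only [List.foldl_cons]
    rw [pvTab_get hp c h (m - 1) j0 (by omega) (by omega) hj0.1 hj0.2,
        pvTab_get c p ct j0 (p - m) hj0.1 hj0.2 hpm0 hpm,
        pvTab_set hp c h m j0 _ (by omega) hm hj0.1 hj0.2,
        ih _ (fun j hj => hJ j (List.mem_cons_of_mem j0 hj))]
    apply pvTab_congr
    intro i a _ _ _ _
    by_cases hcase : i = m ∧ a ∈ J
    · have hni : ¬ (m - 1 = m ∧ a = j0) := by omega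
      rw [if_pos hcase, if_neg hni, if_pos ⟨hcase.1, List.mem_cons_of_mem j0 hcase.2⟩]
    · rw [if_neg hcase]
      by_cases h2 : i = m ∧ a = j0
      · obtain ⟨rfl, rfl⟩ := h2
        rw [if_pos ⟨rfl, rfl⟩, if_pos ⟨rfl, by simp⟩]
      · rw [if_neg h2, if_neg (by
          intro hcon
          rcases List.mem_cons.mp hcon.2 with h3 | h3
          · exact h2 ⟨hcon.1, h3⟩
          · exact hcase ⟨hcon.1, h3⟩)]

lemma pvPhase2 (p hp c elen : Int) (E : List Int) (W : Int → Int → Int)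
    (hp0 : 0 < p) (hhp : hp = PySem.Int.floordiv (p + 1) 2) (_hc : 0 < c)
    (helen : elen = (E.length : Int))
    (hW : ∀ a e, 0 ≤ W a e ∧ W a e < p)
    (m : Int) (hm1 : 1 ≤ m) (hm : m ≤ hp) :
    (PySem.List.pyRange 1 m 1).foldl (fun t i =>
        (PySem.List.pyRange 0 c 1).foldl (fun t j =>
          pvSet2 t i j (pvGet2 t (i - 1) j + elen
            - p * pvGet2 (pvTab c p (fun a v => ((E.countP (fun e => W a e == v) : Nat) : Int))) j (p - i))) t)
      (pvTab hp c (fun i a => if i = 0 then (E.map (fun e => PySem.Int.mod (W a e + 0) p)).sum else 0))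
    = pvTab hp c (fun i a => if i < m then (E.map (fun e => PySem.Int.mod (W a e + i) p)).sum else 0) := by
  have hb := pvHp_bounds p hp0
  rw [← hhp] at hb
  induction m, hm1 using Int.le_induction with
  | base =>
    rw [PySem.List.pyRange_one_eq_nil le_rfl]
    simp only [List.foldl_nil]
    apply pvTab_congr
    intro i a h0 _ _ _
    by_cases hi : i = 0
    · subst hi; simp
    · rw [if_neg hi, if_neg (by omega)]
  | succ n hn ih =>
    rw [PySem.List.pyRange_one_succ_right (by omega), List.foldl_append,
        ih (by omega), List.foldl_cons, List.foldl_nil,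
        pvRow_fold hp c p elen n _ _ _
          (fun j hj => by rw [PySem.List.mem_pyRange_one] at hj; exact ⟨hj.1, hj.2⟩)
          (by omega) (by omega) (by omega) (by omega)]
    apply pvTab_congr
    intro i a _ _ ha0 hac
    by_cases hcase : i = n
    · subst hcase
      rw [if_pos ⟨rfl, by rw [PySem.List.mem_pyRange_one]; exact ⟨ha0, hac⟩⟩,
          if_pos (by omega : i < i + 1), if_pos (by omega : i - 1 < i)]
      rw [pvShift_sum p i E (W a) (fun e _ => hW a e) (by omega) (by omega), helen]
    · rw [if_neg (by intro hcon; exact hcase hcon.1)]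
      by_cases h2 : i < n
      · rw [if_pos h2, if_pos (by omega)]
      · rw [if_neg h2, if_neg (by omega)]

lemma pvZip_self_map {α β : Type} (l : List α) (g : α → β) :
    l.zip (l.map g) = l.map (fun x => (x, g x)) := by
  induction l with
  | nil => rfl
  | cons x l ih => simp [ih]

lemma pvCore (p hp u : Int) (coeffs : List Int) (Vf : Int → Int → Int)
    (hp0 : 0 < p) (hhp : hp = PySem.Int.floordiv (p + 1) 2)
    (hV : ∀ a l, 0 ≤ Vf a l ∧ Vf a l < p) :
    (let st := (PySem.List.pyRange 0 3 1).foldl (fun st k =>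
        (PySem.List.pyRange 0 p 1).foldl (fun st l =>
          (pvUpd2 st.1 0 k (· + Vf k l), pvUpd2 st.2.1 k (Vf k l) (· + 1),
           pvUpd2 st.2.2.1 0 l (· + Vf k l), pvUpd2 st.2.2.2 l (Vf k l) (· + 1))) st)
      (pvTab hp 3 (fun _ _ => 0), pvTab 3 p (fun _ _ => 0),
       pvTab hp p (fun _ _ => 0), pvTab p p (fun _ _ => 0));
     let line_sums := (PySem.List.pyRange 1 hp 1).foldl (fun t i =>
        (PySem.List.pyRange 0 3 1).foldl (fun t j =>
          pvSet2 t i j (pvGet2 t (i - 1) j + p - p * pvGet2 st.2.1 j (p - i))) t) st.1;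
     let point_sums := (PySem.List.pyRange 1 hp 1).foldl (fun t i =>
        (PySem.List.pyRange 0 p 1).foldl (fun t j =>
          pvSet2 t i j (pvGet2 t (i - 1) j + 3 - p * pvGet2 st.2.2.2 j (p - i))) t) st.2.2.1;
     ((PySem.List.pyRange 1 hp 1).zip
        ((PySem.List.slice line_sums (some 1) none).zip (PySem.List.slice point_sums (some 1) none))).map
       (fun t => [t.1] ++ coeffs ++ [u] ++ t.2.1 ++ t.2.2))
    = (PySem.List.pyRange 1 hp 1).map (fun x =>
        [x] ++ coeffs ++ [u]
          ++ (PySem.List.pyRange 0 3 1).map (fun k =>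
               ((PySem.List.pyRange 0 p 1).map (fun l => PySem.Int.mod (pvGet2 (pvTab 3 p Vf) k l + x) p)).sum)
          ++ (PySem.List.pyRange 0 p 1).map (fun j =>
               ((PySem.List.pyRange 0 3 1).map (fun k => PySem.Int.mod (pvGet2 (pvTab 3 p Vf) k j + x) p)).sum)) := by
  have hb := pvHp_bounds p hp0
  rw [← hhp] at hb
  have hhp0 : 0 < hp := by omega
  -- phase 1
  rw [pvPhase1 p hp Vf hhp0 hp0 hV]
  -- initial tables rewritten to the mod (· + 0) form pvPhase2 expects
  have hconv1 : pvTab hp 3 (fun i j => if i = 0 then ((PySem.List.pyRange 0 p 1).map (Vf j)).sum else 0)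
      = pvTab hp 3 (fun i a => if i = 0 then ((PySem.List.pyRange 0 p 1).map (fun e => PySem.Int.mod (Vf a e + 0) p)).sum else 0) := by
    apply pvTab_congr
    intro i a _ _ _ _
    congr 1
    congr 1
    apply List.map_congr_left
    intro e _
    rw [add_zero, pvMod_small _ _ (hV a e).1 (hV a e).2]
  have hconv2 : pvTab hp p (fun i l => if i = 0 then ((PySem.List.pyRange 0 3 1).map (fun a => Vf a l)).sum else 0)
      = pvTab hp p (fun i a => if i = 0 then ((PySem.List.pyRange 0 3 1).map (fun e => PySem.Int.mod (Vf e a + 0) p)).sum else 0) := by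
    apply pvTab_congr
    intro i a _ _ _ _
    congr 1
    congr 1
    apply List.map_congr_left
    intro e _
    rw [add_zero, pvMod_small _ _ (hV e a).1 (hV e a).2]
  simp only []
  rw [hconv1, hconv2]
  rw [pvPhase2 p hp 3 p (PySem.List.pyRange 0 p 1) Vf hp0 hhp (by omega)
        (by rw [PySem.List.length_pyRange_one]; omega) hV hp (by omega) le_rfl,
      pvPhase2 p hp p 3 (PySem.List.pyRange 0 3 1) (fun a e => Vf e a) hp0 hhp hp0
        (by rw [PySem.List.length_pyRange_one]; omega) (fun a e => hV e a) hp (by omega) le_rfl]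
  -- assemble rows
  rw [PySem.List.slice_from_one, PySem.List.slice_from_one]
  unfold pvTab
  rw [PySem.List.pyRange_one_cons hhp0, List.map_cons, List.map_cons, List.tail_cons, List.tail_cons]
  simp only [zero_add]
  rw [List.zip_map', pvZip_self_map, List.map_map]
  apply List.map_congr_left
  intro x hx
  rw [PySem.List.mem_pyRange_one] at hx
  simp only [Function.comp]
  refine congrArg₂ HAppend.hAppend (congrArg₂ HAppend.hAppend rfl ?_) ?_
  · apply List.map_congr_left
    intro k hk
    rw [PySem.List.mem_pyRange_one] at hk
    beta_reduce
    rw [if_pos (by omega : x < hp)]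
    congr 1
    apply List.map_congr_left
    intro l hl
    rw [PySem.List.mem_pyRange_one] at hl
    unfold pvGet2
    rw [PySem.List.pyGetD_map_pyRange_of_nonneg _ 3 k _ hk.1 hk.2,
        PySem.List.pyGetD_map_pyRange_of_nonneg _ p l _ hl.1 hl.2]
  · apply List.map_congr_left
    intro j hj
    rw [PySem.List.mem_pyRange_one] at hj
    beta_reduce
    rw [if_pos (by omega : x < hp)]
    congr 1
    apply List.map_congr_left
    intro k hk
    rw [PySem.List.mem_pyRange_one] at hk
    unfold pvGet2
    rw [PySem.List.pyGetD_map_pyRange_of_nonneg _ 3 k _ hk.1 hk.2,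
        PySem.List.pyGetD_map_pyRange_of_nonneg _ p j _ hj.1 hj.2]

lemma pvMain (p u : Int) (coeffs : List Int) :
    poly_to_rows p u coeffs = poly_to_rows_alt p u coeffs := by
  by_cases hp0 : 0 < p
  · exact pvCore p (PySem.Int.floordiv (p + 1) 2) u coeffs
      (fun k l => PySem.Int.mod (PySem.List.pyGetD
          (([-u, u - 1, u * (1 - u)] : List Int).map (fun denom => pymodinv (PySem.Int.mod denom p) p)) k 0 *
        (PySem.List.pyGetD (([0, 1, u] : List Int).map (fun d =>
            (((PySem.List.slice coeffs none (some 3)).zip [1, d, d * d]).map (fun xy => xy.1 * xy.2)).sum)) k 0 +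
          PySem.List.pyGetD coeffs 3 0 * l * l)) p)
      hp0 rfl (fun a l => ⟨(pvMod_bounds _ p hp0).1, (pvMod_bounds _ p hp0).2⟩)
  · -- p ≤ 0: hp ≤ 0, so range(1, hp) is empty and both sides are []
    have hnil : PySem.List.pyRange 1 (PySem.Int.floordiv (p + 1) 2) 1 = [] := by
      apply PySem.List.pyRange_one_eq_nil
      have := (PySem.Int.floordiv_lt_iff_lt_mul (a := p + 1) (b := 2) (q := 1) (by omega)).mpr (by omega)
      omega
    simp only [poly_to_rows, poly_to_rows_alt, hnil, List.zip_nil_left, List.map_nil]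

-- ===== VERDICT (by name: the statement is the Claim_ definition above) =====
theorem poly_to_rows_spec : Claim_equal_poly_to_rows := by
  intro p u coeffs _ _
  unfold Spec_poly_to_rows
  exact pvMain p u coeffs
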